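-- pv_equiv track=rewrite | github.com/SUKIRTHAN546/KRUU_GRASP | KRUU_GRASP/logic/alerts.py | decide_alert_action
-- ===== SOURCE A (Python) =====
-- def decide_alert_action(violations):
--     if not violations:
--         return "INFO"
--
--     severities = [v[0] for v in violations]
--
--     if "CRITICAL" in severities:
--         return "CRITICAL"
--     if "WARNING" in severities:
--         return "WARNING"
--
--     return "INFO"
-- ===== SOURCE B (Python) =====
-- def decide_alert_action(violations):
--     priority = 0
--     for v in violations:
--         s = v[0]
--         if s == "CRITICAL":
--             priority = max(priority, 2)
--         elif s == "WARNING":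
--             priority = max(priority, 1)
--     return ("INFO", "WARNING", "CRITICAL")[priority]
-- ===== Notes on version B (the rewrite author's own statement) =====
-- stated objective: simpler
-- what changed: Replaces the intermediate severities list and two membership scans by a single pass that folds a numeric max-priority, mapped back to a label at the end.
import Mathlib
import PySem

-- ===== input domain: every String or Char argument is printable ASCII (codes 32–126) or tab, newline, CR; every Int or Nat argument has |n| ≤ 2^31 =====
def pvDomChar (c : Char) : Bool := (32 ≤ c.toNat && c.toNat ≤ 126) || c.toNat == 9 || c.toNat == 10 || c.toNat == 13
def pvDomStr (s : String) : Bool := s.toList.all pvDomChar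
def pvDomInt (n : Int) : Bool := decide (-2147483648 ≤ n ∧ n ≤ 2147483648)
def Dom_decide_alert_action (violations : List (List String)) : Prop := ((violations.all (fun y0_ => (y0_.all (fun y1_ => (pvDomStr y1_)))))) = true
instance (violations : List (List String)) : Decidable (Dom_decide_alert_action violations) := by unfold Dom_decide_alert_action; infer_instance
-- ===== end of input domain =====

-- B replaces A's intermediate severities list and two membership scans by a single
-- fold maintaining a numeric max-priority, mapped back to a label at the end (simpler).


-- ===== PORT A =====
def decide_alert_action (violations : List (List String)) : String :=
  if violations = [] then "INFO"
  else
    let severities := violations.map (fun v => (PySem.List.pyGet? v 0).getD "")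
    if severities.contains "CRITICAL" then "CRITICAL"
    else if severities.contains "WARNING" then "WARNING"
    else "INFO"

-- ===== PORT B =====
def decide_alert_action_alt (violations : List (List String)) : String :=
  let priority := violations.foldl (fun p v =>
    let s := (PySem.List.pyGet? v 0).getD ""
    if s = "CRITICAL" then max p 2
    else if s = "WARNING" then max p 1
    else p) (0 : Nat)
  if priority = 2 then "CRITICAL" else if priority = 1 then "WARNING" else "INFO"

-- ===== PRECONDITION & SPEC =====
-- Pre_ excludes exactly the inputs where Python A raises IndexError: a nonempty
-- violations list containing an empty inner list (v[0] fails). B raises there too.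
def Pre_decide_alert_action (violations : List (List String)) : Prop :=
  ∀ v ∈ violations, v ≠ []
instance (violations : List (List String)) : Decidable (Pre_decide_alert_action violations) := by
  unfold Pre_decide_alert_action; infer_instance

def pvWitness_decide_alert_action : List (List String) := [["WARNING", "x"], ["INFO"]]

def Spec_decide_alert_action (violations : List (List String)) (out : String) : Prop := out = decide_alert_action_alt violations
instance (violations : List (List String)) (out : String) : Decidable (Spec_decide_alert_action violations out) := by unfold Spec_decide_alert_action; infer_instance

-- ===== CLAIM (what is proved, stated in full; the proofs are below) =====
def Claim_equal_decide_alert_action : Prop := ∀ (violations : List (List String)), Dom_decide_alert_action violations → Pre_decide_alert_action violations → Spec_decide_alert_action violations (decide_alert_action violations)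

-- ===== LEMMAS AND PROOFS =====

-- B's fold step over a severity string
def pvStep (p : Nat) (s : String) : Nat :=
  if s = "CRITICAL" then max p 2 else if s = "WARNING" then max p 1 else p

-- value of a severity list under A's membership view
def pvVal (l : List String) : Nat :=
  if l.contains "CRITICAL" then 2 else if l.contains "WARNING" then 1 else 0

theorem foldl_pvStep (l : List String) (p : Nat) :
    l.foldl pvStep p = max p (pvVal l) := by
  induction l generalizing p with
  | nil => simp [pvVal]
  | cons s t ih =>
    simp only [List.foldl_cons, ih]
    unfold pvStep pvVal
    simp only [List.contains_cons, Bool.or_eq_true, beq_iff_eq]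
    by_cases h1 : s = "CRITICAL" <;> by_cases h2 : s = "WARNING" <;>
      by_cases hc : "CRITICAL" ∈ t <;> by_cases hw : "WARNING" ∈ t <;>
      simp [h1, h2, hc, hw, eq_comm]

-- ===== VERDICT (by name: the statement is the Claim_ definition above) =====
theorem decide_alert_action_spec : Claim_equal_decide_alert_action := by
  intro violations _ _
  unfold Spec_decide_alert_action decide_alert_action decide_alert_action_alt
  have hfold : violations.foldl (fun p v =>
      let s := (PySem.List.pyGet? v 0).getD ""
      if s = "CRITICAL" then max p 2 else if s = "WARNING" then max p 1 else p) (0 : Nat)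
      = pvVal (violations.map (fun v => (PySem.List.pyGet? v 0).getD "")) := by
    rw [show (fun p v =>
      let s := (PySem.List.pyGet? v 0).getD ""
      if s = "CRITICAL" then max p 2 else if s = "WARNING" then max p 1 else p)
      = (fun p v => pvStep p ((PySem.List.pyGet? v 0).getD "")) from rfl,
      ← List.foldl_map, foldl_pvStep]
    omega
  rw [hfold]
  cases violations with
  | nil => simp [pvVal]
  | cons v t =>
    simp only [if_neg (List.cons_ne_nil v t)]
    unfold pvVal
    split_ifs <;> simp_all
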